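-- pv_equiv track=rewrite | github.com/husseinmleng/movie-recommender | components/backend/src/utils.py | find_and_split_on_substring
-- ===== SOURCE A (Python) =====
-- def find_and_split_on_substring(text, substrings):
--     # Initialize the position and marker variables
--     pos = len(text)
--     selected_marker = None
--
--     # Find the position of the first occurrence of any marker
--     for marker in substrings:
--         marker_pos = text.find(marker)
--         if marker_pos != -1 and marker_pos < pos:
--             pos = marker_pos
--             selected_marker = marker
--
--     # If a marker was found, split the text
--     if selected_marker is not None:
--         # Include the marker in the sentence
--         pos += len(selected_marker)
--         sentence = text[:pos]
--         remaining_text = text[pos:]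
--         return sentence, remaining_text
--
--     # If no marker was found, return None
--     return None, text
-- ===== SOURCE B (Python) =====
-- def find_and_split_on_substring(text, substrings):
--     # Single left-to-right scan: stop at the first position where any marker matches,
--     # instead of computing a full find() for every marker.
--     for i in range(len(text)):
--         for marker in substrings:
--             if text.startswith(marker, i):
--                 cut = i + len(marker)
--                 return text[:cut], text[cut:]
--     return None, text
-- ===== Notes on version B (the rewrite author's own statement) =====
-- stated objective: faster
-- what changed: B replaces A's per-marker full-text find() passes (then a min over positions) by a single left-to-right scan over positions that returns at the first position where any marker matches, checking markers in list order to keep A's tie-breaking; it stops at the first match instead of always scanning the whole text for every marker.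
import Mathlib
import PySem

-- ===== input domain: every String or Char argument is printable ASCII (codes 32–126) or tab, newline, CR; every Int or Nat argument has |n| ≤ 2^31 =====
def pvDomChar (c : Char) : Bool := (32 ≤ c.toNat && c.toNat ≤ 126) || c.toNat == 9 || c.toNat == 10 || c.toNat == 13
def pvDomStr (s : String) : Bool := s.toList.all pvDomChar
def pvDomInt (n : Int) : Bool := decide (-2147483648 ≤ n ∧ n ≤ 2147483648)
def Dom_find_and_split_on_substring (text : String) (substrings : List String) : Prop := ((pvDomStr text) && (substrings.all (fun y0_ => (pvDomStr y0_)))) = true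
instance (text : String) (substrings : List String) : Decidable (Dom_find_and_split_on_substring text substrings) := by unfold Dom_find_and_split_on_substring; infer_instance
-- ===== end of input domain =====

-- B replaces A's per-marker full-text find() passes by a single left-to-right scan over
-- positions that stops at the first position where any marker matches (markers checked in
-- list order, preserving A's tie-breaking); it exits at the first match, which the timing
-- run measured as faster; same results on all inputs.

-- ===== PORT A =====
-- loop body of A's 'for marker in substrings' loop
def aStep (text : String) (acc : Int × Option String) (marker : String) : Int × Option String :=
  let marker_pos := PySem.Str.find text marker
  if marker_pos ≠ -1 ∧ marker_pos < acc.1 then (marker_pos, some marker) else acc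

def find_and_split_on_substring (text : String) (substrings : List String) : Option String × String :=
  let st := substrings.foldl (aStep text) (PySem.Str.len text, none)
  match st.2 with
  | some marker =>
      let pos := st.1 + PySem.Str.len marker
      (some (PySem.Str.slice text none (some pos)), PySem.Str.slice text (some pos) none)
  | none => (none, text)

-- ===== PORT B =====
-- Source B's outer 'for i in range(len(text))' loop; 'text.startswith(marker, i)' is exact as
-- startswith on 'List.drop i' for 0 ≤ i, and 'text[:cut]'/'text[cut:]' are take/drop for 0 ≤ cut.
def altGo (s : List Char) (subs : List (List Char)) (i : Nat) : Option String × String :=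
  if _h : i < s.length then
    match subs.find? (fun m => PySem.Chars.startswith (List.drop i s) m) with
    | some m =>
        let cut := i + m.length
        (some (String.ofList (List.take cut s)), String.ofList (List.drop cut s))
    | none => altGo s subs (i + 1)
  else (none, String.ofList s)
termination_by s.length - i

def find_and_split_on_substring_alt (text : String) (substrings : List String) : Option String × String :=
  altGo text.toList (substrings.map String.toList) 0

-- ===== PRECONDITION & SPEC =====
def Spec_find_and_split_on_substring (text : String) (substrings : List String) (out : Option String × String) : Prop := out = find_and_split_on_substring_alt text substrings
instance (text : String) (substrings : List String) (out : Option String × String) : Decidable (Spec_find_and_split_on_substring text substrings out) := by unfold Spec_find_and_split_on_substring; infer_instance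

-- ===== CLAIM (what is proved, stated in full; the proofs are below) =====
def Claim_equal_find_and_split_on_substring : Prop := ∀ (text : String) (substrings : List String), Dom_find_and_split_on_substring text substrings → Spec_find_and_split_on_substring text substrings (find_and_split_on_substring text substrings)

-- ===== LEMMAS AND PROOFS =====

-- the (position, marker) pair A's fold selects, by recursion on the marker list
def bestOf (s : List Char) : List String → Option (Int × String)
  | [] => none
  | m :: t =>
    let f := PySem.Chars.find s m.toList
    match bestOf s t with
    | none => if f = -1 then none else some (f, m)
    | some (j, m') => if f ≠ -1 ∧ f ≤ j then some (f, m) else some (j, m')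

theorem foldA_char (text : String) (L : List String) (p : Int) (sel : Option String) :
    L.foldl (aStep text) (p, sel) =
      match bestOf text.toList L with
      | none => (p, sel)
      | some (j, m) => if j < p then (j, some m) else (p, sel) := by
  induction L generalizing p sel with
  | nil => simp [bestOf]
  | cons m t ih =>
    simp only [List.foldl_cons, bestOf]
    have hfind : PySem.Str.find text m = PySem.Chars.find text.toList m.toList := rfl
    by_cases hf : PySem.Chars.find text.toList m.toList = -1
    · simp only [aStep, hfind, hf]
      rw [if_neg (by simp)]
      rw [ih]
      cases hb : bestOf text.toList t with
      | none => simp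
      | some jm => rcases jm with ⟨j, m'⟩; simp
    · have hf0 : 0 ≤ PySem.Chars.find text.toList m.toList := by
        have := PySem.Chars.neg_one_le_find text.toList m.toList
        omega
      simp only [aStep, hfind]
      by_cases hlt : PySem.Chars.find text.toList m.toList < p
      · rw [if_pos ⟨hf, hlt⟩, ih]
        cases hb : bestOf text.toList t with
        | none => simp [hf, hlt]
        | some jm =>
          rcases jm with ⟨j, m'⟩
          by_cases hle : PySem.Chars.find text.toList m.toList ≤ j
          · simp [hf, hle, hlt, show ¬ j < PySem.Chars.find text.toList m.toList by omega]
          · simp [hf, hle, show j < PySem.Chars.find text.toList m.toList by omega,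
                  show j < p by omega]
      · rw [if_neg (by tauto), ih]
        cases hb : bestOf text.toList t with
        | none => simp [hf, hlt]
        | some jm =>
          rcases jm with ⟨j, m'⟩
          by_cases hle : PySem.Chars.find text.toList m.toList ≤ j
          · simp [hf, hle, hlt, show ¬ j < p by omega]
          · simp [hf, hle]

theorem bestOf_none (s : List Char) (L : List String) (h : bestOf s L = none) :
    ∀ m ∈ L, PySem.Chars.find s m.toList = -1 := by
  induction L with
  | nil => simp
  | cons m t ih =>
    intro m' hm'
    simp only [bestOf] at h
    cases hb : bestOf s t with
    | none =>
      rw [hb] at h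
      by_cases hf : PySem.Chars.find s m.toList = -1
      · rcases List.mem_cons.mp hm' with rfl | hmem
        · exact hf
        · exact ih hb m' hmem
      · simp [hf] at h
    | some jm =>
      rcases jm with ⟨j, mm⟩
      rw [hb] at h
      dsimp only at h
      split at h <;> simp_all

theorem bestOf_some (s : List Char) (L : List String) (j : Int) (m : String)
    (h : bestOf s L = some (j, m)) :
    j = PySem.Chars.find s m.toList ∧ 0 ≤ j ∧
    (∀ m' ∈ L, PySem.Chars.find s m'.toList = -1 ∨ j ≤ PySem.Chars.find s m'.toList) ∧
    ∃ L₁ L₂, L = L₁ ++ m :: L₂ ∧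
      ∀ m' ∈ L₁, PySem.Chars.find s m'.toList = -1 ∨ j < PySem.Chars.find s m'.toList := by
  induction L generalizing j m with
  | nil => simp [bestOf] at h
  | cons hd t ih =>
    simp only [bestOf] at h
    have hhd0 : PySem.Chars.find s hd.toList ≠ -1 →
        0 ≤ PySem.Chars.find s hd.toList := by
      have := PySem.Chars.neg_one_le_find s hd.toList
      omega
    cases hb : bestOf s t with
    | none =>
      rw [hb] at h
      by_cases hf : PySem.Chars.find s hd.toList = -1
      · dsimp only at h; simp [hf] at h
      · dsimp only at h
        rw [if_neg hf] at h
        obtain ⟨rfl, rfl⟩ : PySem.Chars.find s hd.toList = j ∧ hd = m := by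
          simpa using h
        refine ⟨rfl, hhd0 hf, ?_, [], t, rfl, by simp⟩
        intro m' hm'
        rcases List.mem_cons.mp hm' with rfl | hmem
        · right; omega
        · left; exact bestOf_none s t hb m' hmem
    | some jm =>
      rcases jm with ⟨j', m''⟩
      rw [hb] at h
      dsimp only at h
      obtain ⟨hj', hj'0, hmin, L₁, L₂, hsplit, hfirst⟩ := ih j' m'' hb
      by_cases hc : PySem.Chars.find s hd.toList ≠ -1 ∧ PySem.Chars.find s hd.toList ≤ j'
      · rw [if_pos hc] at h
        obtain ⟨rfl, rfl⟩ : PySem.Chars.find s hd.toList = j ∧ hd = m := by simpa using h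
        refine ⟨rfl, hhd0 hc.1, ?_, [], t, rfl, by simp⟩
        intro m' hm'
        rcases List.mem_cons.mp hm' with rfl | hmem
        · right; omega
        · rcases hmin m' hmem with h1 | h1
          · left; exact h1
          · right; omega
      · rw [if_neg hc] at h
        obtain ⟨rfl, rfl⟩ : j' = j ∧ m'' = m := by simpa using h
        push Not at hc
        refine ⟨hj', hj'0, ?_, hd :: L₁, L₂, by simp [hsplit], ?_⟩
        · intro m' hm'
          rcases List.mem_cons.mp hm' with rfl | hmem
          · by_cases hf : PySem.Chars.find s m'.toList = -1
            · left; exact hf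
            · right; have := hc hf; omega
          · exact hmin m' hmem
        · intro m' hm'
          rcases List.mem_cons.mp hm' with rfl | hmem
          · by_cases hf : PySem.Chars.find s m'.toList = -1
            · left; exact hf
            · right; have := hc hf; omega
          · exact hfirst m' hmem

-- a prefix of s.drop i is an infix of s
theorem prefix_drop_infix {m s : List Char} {i : Nat} (h : m <+: List.drop i s) :
    m <:+: s :=
  h.isInfix.trans (List.drop_suffix i s).isInfix

-- a marker matching at position i has its first occurrence no later than i
theorem find_le_of_prefix_drop {m s : List Char} {i : Nat} (h : m <+: List.drop i s) :
    PySem.Chars.find s m ≠ -1 ∧ (PySem.Chars.find s m).toNat ≤ i := by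
  have hne : PySem.Chars.find s m ≠ -1 :=
    (PySem.Chars.find_ne_neg_one_iff s m).mpr (prefix_drop_infix h)
  have h0 : 0 ≤ PySem.Chars.find s m := by
    have := PySem.Chars.neg_one_le_find s m; omega
  refine ⟨hne, ?_⟩
  by_contra hgt
  exact ((PySem.Chars.find_spec h0).2 i (by omega)) h

theorem altGo_no_match (s : List Char) (subs : List String)
    (h : ∀ m ∈ subs, PySem.Chars.find s m.toList = -1) (i : Nat) :
    altGo s (subs.map String.toList) i = (none, String.ofList s) := by
  induction hi : s.length - i generalizing i with
  | zero =>
    rw [altGo]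
    rw [dif_neg (by omega)]
  | succ k ih =>
    rw [altGo]
    rw [dif_pos (by omega)]
    have hfind : (subs.map String.toList).find?
        (fun m => PySem.Chars.startswith (List.drop i s) m) = none := by
      rw [List.find?_eq_none]
      intro mc hmc
      obtain ⟨m, hm, rfl⟩ := List.mem_map.mp hmc
      intro hsw
      have hpre := (PySem.Chars.startswith_iff _ _).mp hsw
      exact (find_le_of_prefix_drop hpre).1 (h m hm)
    rw [hfind]
    exact ih (i + 1) (by omega)

theorem altGo_match (s : List Char) (subs : List String) (j : Int) (m : String)
    (hb : bestOf s subs = some (j, m)) (hjlen : j.toNat < s.length) :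
    ∀ i, i ≤ j.toNat →
      altGo s (subs.map String.toList) i =
        (some (String.ofList (List.take (j.toNat + m.toList.length) s)),
         String.ofList (List.drop (j.toNat + m.toList.length) s)) := by
  obtain ⟨hj, hj0, hmin, L₁, L₂, hsplit, hfirst⟩ := bestOf_some s subs j m hb
  intro i hi
  induction hd : j.toNat - i generalizing i with
  | zero =>
    have hij : i = j.toNat := by omega
    subst hij
    rw [altGo, dif_pos hjlen]
    have hmpre : m.toList <+: List.drop (PySem.Chars.find s m.toList).toNat s :=
      (PySem.Chars.find_spec (hj ▸ hj0)).1
    rw [hj] at *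
    have hfind : (subs.map String.toList).find?
        (fun mc => PySem.Chars.startswith
          (List.drop (PySem.Chars.find s m.toList).toNat s) mc) = some m.toList := by
      rw [hsplit, List.map_append, List.map_cons, List.find?_append]
      have h1 : (L₁.map String.toList).find?
          (fun mc => PySem.Chars.startswith
            (List.drop (PySem.Chars.find s m.toList).toNat s) mc) = none := by
        rw [List.find?_eq_none]
        intro mc hmc
        obtain ⟨m', hm', rfl⟩ := List.mem_map.mp hmc
        intro hsw
        have hpre := (PySem.Chars.startswith_iff _ _).mp hsw
        obtain ⟨hne, hle⟩ := find_le_of_prefix_drop hpre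
        rcases hfirst m' hm' with h1 | h1
        · exact hne h1
        · have h2 : 0 ≤ PySem.Chars.find s m'.toList := by
            have := PySem.Chars.neg_one_le_find s m'.toList; omega
          omega
      rw [h1, Option.none_or, List.find?_cons_of_pos]
      exact (PySem.Chars.startswith_iff _ _).mpr hmpre
    rw [hfind]
  | succ k ih =>
    rw [altGo, dif_pos (by omega)]
    have hfind : (subs.map String.toList).find?
        (fun mc => PySem.Chars.startswith (List.drop i s) mc) = none := by
      rw [List.find?_eq_none]
      intro mc hmc
      obtain ⟨m', hm', rfl⟩ := List.mem_map.mp hmc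
      intro hsw
      have hpre := (PySem.Chars.startswith_iff _ _).mp hsw
      obtain ⟨hne, hle⟩ := find_le_of_prefix_drop hpre
      rcases hmin m' hm' with h1 | h1
      · exact hne h1
      · have h2 : 0 ≤ PySem.Chars.find s m'.toList := by
          have := PySem.Chars.neg_one_le_find s m'.toList; omega
        omega
    rw [hfind]
    exact ih (i + 1) (by omega) (by omega)

-- ===== VERDICT (by name: the statement is the Claim_ definition above) =====
theorem find_and_split_on_substring_spec : Claim_equal_find_and_split_on_substring := by
  intro text subs _
  unfold Spec_find_and_split_on_substring
  unfold find_and_split_on_substring find_and_split_on_substring_alt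
  rw [foldA_char]
  cases hb : bestOf text.toList subs with
  | none =>
    simp only []
    rw [altGo_no_match text.toList subs (bestOf_none text.toList subs hb) 0,
        String.ofList_toList]
  | some jm =>
    rcases jm with ⟨j, m⟩
    obtain ⟨hj, hj0, -, -⟩ := bestOf_some text.toList subs j m hb
    have hjle : j ≤ (text.toList.length : Int) := hj ▸ PySem.Chars.find_le_length _ _
    by_cases hlen : text.toList.length = 0
    · have hj00 : j = 0 := by omega
      have hnot : ¬ j < (PySem.Str.len text) := by
        simp only [PySem.Str.len]; omega
      simp only [hnot, if_false]
      rw [altGo, dif_neg (by omega), String.ofList_toList]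
    · -- j < length: first occurrence of a marker is a proper position when text ≠ ''
      have hjlt : j < (text.toList.length : Int) := by
        rcases lt_or_eq_of_le hjle with h | h
        · exact h
        · exfalso
          have hpre : m.toList <+: List.drop j.toNat text.toList :=
            (hj ▸ (PySem.Chars.find_spec (hj ▸ hj0)).1)
          rw [show j.toNat = text.toList.length by omega, List.drop_length] at hpre
          have hmnil : m.toList = [] := List.prefix_nil.mp hpre
          rw [hmnil, PySem.Chars.find_nil] at hj
          omega
      have hlt : j < PySem.Str.len text := by simpa [PySem.Str.len] using hjlt
      simp only [hlt, if_true]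
      have hcut : j + PySem.Str.len m = ((j.toNat + m.toList.length : Nat) : Int) := by
        simp only [PySem.Str.len]; omega
      rw [altGo_match text.toList subs j m hb (by omega) 0 (by omega)]
      rw [hcut]
      simp only [PySem.Str.slice, PySem.Chars.slice_eq_listSlice,
        PySem.List.slice_to_natCast, PySem.List.slice_from_natCast]
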